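-- pv_equiv track=rewrite | github.com/subhylahiri/numpy_linalg_extras | numpy_linalg/testing/unittest_numpy.py | _core_sizes
-- ===== SOURCE A (Python) =====
-- from typing import Dict, List, Optional, Tuple, TypeVar, Union
--
-- def _core_sizes(sigs_in: List[Tuple[str, ...]],
--                 cores: List[Tuple[int, ...]],
--                 msg: str) -> Dict[str, int]:
--     """Extract value of each size variable
--
--     Parameters
--     ----------
--     sigs_in : List[Tuple[str, ...]]
--         Signatures of input arrays
--     cores : List[Tuple[int, ...]]
--         Core shapes of input arrays
--     msg : str
--         Potential error message
--
--     Returns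
--     -------
--     sizes : Dict[str, int]
--         Values of each size variable
--
--     Raises
--     ------
--     ValueError
--         [description]
--     """
--     sizes = {}
--     for sig, core in zip(sigs_in, cores):
--         for name, siz in zip(sig, core):
--             sizes.setdefault(name, siz)
--             if sizes[name] != siz:
--                 raise ValueError('Array mismatch in its core ' + msg)
--     return sizes
-- ===== SOURCE B (Python) =====
-- def _core_sizes(sigs_in, cores, msg):
--     # Flatten all (name, size) pairs once.
--     pairs = [p for sig, core in zip(sigs_in, cores) for p in zip(sig, core)]
--     # Pass 1: record the first size observed for each name.
--     first = {}
--     for name, siz in pairs: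
--         if name not in first:
--             first[name] = siz
--     # Pass 2: every pair must agree with the first size recorded for its name.
--     if any(first[name] != siz for name, siz in pairs):
--         raise ValueError('Array mismatch in its core ' + msg)
--     return first
-- ===== Notes on version B (the rewrite author's own statement) =====
-- stated objective: alternative
-- what changed: A's single fused loop that builds the dict with setdefault and checks each pair against it as it goes is replaced by a staged design: flatten all (name,size) pairs once, a first pass recording the first size per name, and a separate validation pass checking every pair against that record.
import Mathlib
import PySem

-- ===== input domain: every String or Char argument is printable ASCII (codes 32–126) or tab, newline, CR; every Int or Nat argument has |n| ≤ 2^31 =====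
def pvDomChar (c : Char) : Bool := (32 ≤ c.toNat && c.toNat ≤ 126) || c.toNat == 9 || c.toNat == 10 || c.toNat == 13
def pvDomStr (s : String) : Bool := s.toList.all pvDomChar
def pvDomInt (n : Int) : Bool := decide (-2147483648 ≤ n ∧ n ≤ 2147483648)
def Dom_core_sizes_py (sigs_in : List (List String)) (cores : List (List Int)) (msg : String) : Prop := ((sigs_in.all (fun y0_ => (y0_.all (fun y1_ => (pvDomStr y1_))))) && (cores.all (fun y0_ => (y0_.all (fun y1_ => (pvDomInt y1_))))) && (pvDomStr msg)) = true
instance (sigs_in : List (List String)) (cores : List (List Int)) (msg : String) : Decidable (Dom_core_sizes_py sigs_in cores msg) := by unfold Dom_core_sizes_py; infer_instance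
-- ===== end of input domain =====

-- B replaces A's fused build-with-setdefault-and-check-as-you-go loop by a staged design: flatten
-- the pairs once, record the first size per name, then a separate validation pass over all pairs
-- (alternative decomposition, same cost); where A raises ValueError B raises the same ValueError.

-- ===== PORT A =====
-- One step of A's inner loop: sizes.setdefault(name, siz); if sizes[name] != siz: raise (none = the raise).
-- After setdefault the key is always present, so sizes[name] is ported as getD (exact here).
def coreSizesAStep (acc : Option (PySem.Dict String Int)) (p : String × Int) :
    Option (PySem.Dict String Int) :=
  match acc with
  | none => none
  | some d =>
    let d' := d.setdefault p.1 p.2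
    if d'.getD p.1 0 ≠ p.2 then none else some d'

def core_sizes_py (sigs_in : List (List String)) (cores : List (List Int)) (_msg : String) : List (String × Int) :=
  match (sigs_in.zip cores).foldl
      (fun acc sc => (sc.1.zip sc.2).foldl coreSizesAStep acc)
      (some PySem.Dict.empty) with
  | none => []  -- Python raises ValueError here; excluded by Pre_
  | some d => d.items

-- ===== PORT B =====
def core_sizes_py_alt (sigs_in : List (List String)) (cores : List (List Int)) (_msg : String) : List (String × Int) :=
  -- pairs = [p for sig, core in zip(sigs_in, cores) for p in zip(sig, core)]
  let pairs := (sigs_in.zip cores).flatMap (fun sc => sc.1.zip sc.2)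
  -- pass 1: record the first size observed for each name ('if name not in first: first[name] = siz')
  let first := pairs.foldl
      (fun d p => if d.contains p.1 then d else d.insert p.1 p.2) PySem.Dict.empty
  -- pass 2: every pair must agree with the recorded first size (first[name] is present, so getD is exact)
  if pairs.any (fun p => !(first.getD p.1 0 == p.2)) then
    []  -- Python raises ValueError here; excluded by Pre_
  else first.items

-- ===== PRECONDITION & SPEC =====
-- Pre_ excludes exactly the inputs on which A raises ValueError: two (name, size) pairs with the
-- same name but different sizes among the zipped signatures/cores.
def Pre_core_sizes_py (sigs_in : List (List String)) (cores : List (List Int)) (msg : String) : Prop :=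
  ((sigs_in.zip cores).flatMap (fun sc => sc.1.zip sc.2)).Pairwise
    (fun p q => p.1 = q.1 → p.2 = q.2)
instance (sigs_in : List (List String)) (cores : List (List Int)) (msg : String) : Decidable (Pre_core_sizes_py sigs_in cores msg) := by unfold Pre_core_sizes_py; infer_instance

def pvWitness_core_sizes_py : List (List String) × List (List Int) × String :=
  ([["a", "b"], ["b"]], [[2, 3], [3]], "msg")

def Spec_core_sizes_py (sigs_in : List (List String)) (cores : List (List Int)) (msg : String) (out : List (String × Int)) : Prop := out = core_sizes_py_alt sigs_in cores msg
instance (sigs_in : List (List String)) (cores : List (List Int)) (msg : String) (out : List (String × Int)) : Decidable (Spec_core_sizes_py sigs_in cores msg out) := by unfold Spec_core_sizes_py; infer_instance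

-- ===== CLAIM (what is proved, stated in full; the proofs are below) =====
def Claim_equal_core_sizes_py : Prop := ∀ (sigs_in : List (List String)) (cores : List (List Int)) (msg : String), Dom_core_sizes_py sigs_in cores msg → Pre_core_sizes_py sigs_in cores msg → Spec_core_sizes_py sigs_in cores msg (core_sizes_py sigs_in cores msg)

-- ===== LEMMAS AND PROOFS =====

-- flatten A's nested loops over zip(sigs_in, cores) into one fold over the flat pair list
theorem foldl_nested_zip {σ : Type} (f : σ → String × Int → σ)
    (l : List (List String × List Int)) (init : σ) :
    l.foldl (fun acc sc => (sc.1.zip sc.2).foldl f acc) init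
      = (l.flatMap (fun sc => sc.1.zip sc.2)).foldl f init := by
  induction l generalizing init with
  | nil => rfl
  | cons sc rest ih => simp [List.flatMap_cons, List.foldl_append, ih]

-- A's checked loop never raises when the pairs are coherent and agree with the accumulated dict,
-- and then it is the plain setdefault loop
theorem aFold_eq_setdefault (l : List (String × Int)) (d : PySem.Dict String Int)
    (hcoh : l.Pairwise (fun p q => p.1 = q.1 → p.2 = q.2))
    (hinv : ∀ p ∈ l, ∀ v, d.get? p.1 = some v → v = p.2) :
    l.foldl coreSizesAStep (some d)
      = some (l.foldl (fun d p => d.setdefault p.1 p.2) d) := by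
  induction l generalizing d with
  | nil => rfl
  | cons p rest ih =>
    rcases List.pairwise_cons.mp hcoh with ⟨hhead, hrest⟩
    have hchk : (d.setdefault p.1 p.2).getD p.1 0 = p.2 := by
      rw [PySem.Dict.getD_eq_get?_getD, PySem.Dict.get?_setdefault_self]
      cases hg : d.get? p.1 with
      | none => simp
      | some v => simpa using hinv p (by simp) v hg
    have hstep : coreSizesAStep (some d) p = some (d.setdefault p.1 p.2) := by
      simp [coreSizesAStep, hchk]
    rw [List.foldl_cons, List.foldl_cons, hstep]
    refine ih _ hrest ?_
    intro q hq v hv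
    by_cases hc : d.contains p.1
    · rw [PySem.Dict.setdefault_of_contains d p.2 hc] at hv
      exact hinv q (by simp [hq]) v hv
    · rw [PySem.Dict.setdefault_of_not_contains d p.2 (by simpa using hc)] at hv
      rw [PySem.Dict.get?_insert] at hv
      by_cases he : q.1 = p.1
      · rw [if_pos he] at hv
        cases hv
        exact (hhead q hq he.symm)
      · rw [if_neg he] at hv
        exact hinv q (by simp [hq]) v hv

-- B's pass-1 step is setdefault
theorem bStep_eq_setdefault (d : PySem.Dict String Int) (p : String × Int) :
    (if d.contains p.1 then d else d.insert p.1 p.2) = d.setdefault p.1 p.2 := by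
  by_cases hc : d.contains p.1
  · rw [if_pos hc, PySem.Dict.setdefault_of_contains d p.2 hc]
  · rw [if_neg hc, PySem.Dict.setdefault_of_not_contains d p.2 (by simpa using hc)]

-- the setdefault fold preserves existing bindings
theorem setdefault_fold_preserves (l : List (String × Int)) (d : PySem.Dict String Int)
    (k : String) (v : Int) (h : d.get? k = some v) :
    (l.foldl (fun d p => d.setdefault p.1 p.2) d).get? k = some v := by
  induction l generalizing d with
  | nil => exact h
  | cons p rest ih =>
    rw [List.foldl_cons]
    refine ih _ ?_
    by_cases he : k = p.1
    · subst he
      rw [PySem.Dict.get?_setdefault_self, h]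
      rfl
    · rw [PySem.Dict.get?_setdefault_of_ne _ _ he, h]

-- on a coherent pair list, the setdefault fold records every pair's size
theorem setdefault_fold_getD (l : List (String × Int)) (d : PySem.Dict String Int)
    (hcoh : l.Pairwise (fun p q => p.1 = q.1 → p.2 = q.2))
    (hinv : ∀ p ∈ l, ∀ v, d.get? p.1 = some v → v = p.2) :
    ∀ p ∈ l, (l.foldl (fun d p => d.setdefault p.1 p.2) d).getD p.1 0 = p.2 := by
  induction l generalizing d with
  | nil => simp
  | cons p rest ih =>
    rcases List.pairwise_cons.mp hcoh with ⟨hhead, hrest⟩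
    have hself : (d.setdefault p.1 p.2).get? p.1 = some p.2 := by
      rw [PySem.Dict.get?_setdefault_self]
      cases hg : d.get? p.1 with
      | none => simp
      | some v => simpa using hinv p (by simp) v hg
    have hinv' : ∀ q ∈ rest, ∀ v, (d.setdefault p.1 p.2).get? q.1 = some v → v = q.2 := by
      intro q hq v hv
      by_cases he : q.1 = p.1
      · rw [he, hself] at hv
        cases hv
        exact (hhead q hq he.symm)
      · rw [PySem.Dict.get?_setdefault_of_ne _ _ he] at hv
        exact hinv q (by simp [hq]) v hv
    intro q hq
    rw [List.foldl_cons]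
    rcases List.mem_cons.mp hq with rfl | hq'
    · rw [PySem.Dict.getD_eq_get?_getD,
        setdefault_fold_preserves rest _ q.1 q.2 hself]
      rfl
    · exact ih _ hrest hinv' q hq'

theorem core_sizes_py_spec_aux (sigs_in : List (List String)) (cores : List (List Int))
    (msg : String) (hpre : Pre_core_sizes_py sigs_in cores msg) :
    core_sizes_py sigs_in cores msg = core_sizes_py_alt sigs_in cores msg := by
  unfold Pre_core_sizes_py at hpre
  set l := (sigs_in.zip cores).flatMap (fun sc => sc.1.zip sc.2) with hl
  have hempty : ∀ p ∈ l, ∀ v, (PySem.Dict.empty : PySem.Dict String Int).get? p.1 = some v → v = p.2 :=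
    fun p _ v hv => by simp [PySem.Dict.get?_empty] at hv
  have hA : core_sizes_py sigs_in cores msg
      = (l.foldl (fun d p => d.setdefault p.1 p.2) PySem.Dict.empty).items := by
    unfold core_sizes_py
    rw [foldl_nested_zip coreSizesAStep, ← hl,
      aFold_eq_setdefault l PySem.Dict.empty hpre hempty]
  have hfirst : l.foldl (fun d p => if d.contains p.1 then d else d.insert p.1 p.2)
        PySem.Dict.empty
      = l.foldl (fun d p => d.setdefault p.1 p.2) PySem.Dict.empty :=
    PySem.List.foldl_congr_mem l _ _ _ (fun d p _ => bStep_eq_setdefault d p)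
  have hchk : l.any (fun p =>
      !((l.foldl (fun d p => d.setdefault p.1 p.2) PySem.Dict.empty).getD p.1 0 == p.2))
      = false := by
    simp only [List.any_eq_false, Bool.not_eq_eq_eq_not, Bool.not_true, beq_eq_false_iff_ne,
      ne_eq, not_not]
    exact setdefault_fold_getD l PySem.Dict.empty hpre hempty
  have hB : core_sizes_py_alt sigs_in cores msg
      = (l.foldl (fun d p => d.setdefault p.1 p.2) PySem.Dict.empty).items := by
    show (let pairs := l;
      let first := pairs.foldl
        (fun d p => if d.contains p.1 then d else d.insert p.1 p.2) PySem.Dict.empty;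
      if pairs.any (fun p => !(first.getD p.1 0 == p.2)) then [] else first.items) = _
    simp only [hfirst, hchk, Bool.false_eq_true, if_false]
  rw [hA, hB]

-- ===== VERDICT =====
theorem core_sizes_py_spec : Claim_equal_core_sizes_py := by
  intro sigs_in cores msg _hdom hpre
  unfold Spec_core_sizes_py
  exact core_sizes_py_spec_aux sigs_in cores msg hpre
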